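-- pv_equiv track=rewrite | github.com/JSB2010/sl-emails | src/sl_emails/signage/generate_signage.py | audience_label
-- ===== SOURCE A (Python) =====
-- def audience_label(audiences: list[str]) -> str:
--     normalized = {str(audience or "").strip().lower() for audience in audiences if str(audience or "").strip()}
--     if {"middle-school", "upper-school"}.issubset(normalized):
--         return "All School"
--     if "middle-school" in normalized:
--         return "Middle School"
--     if "upper-school" in normalized:
--         return "Upper School"
--     return ""
-- ===== SOURCE B (Python) =====
-- _LABELS = {"middle-school": "Middle School", "upper-school": "Upper School"}
--
--
-- def _join(x, y):
--     # join in the label lattice: "" is bottom, "All School" is top,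
--     # "Middle School" and "Upper School" are incomparable.
--     if x == y or y == "":
--         return x
--     if x == "":
--         return y
--     return "All School"
--
--
-- def audience_label(audiences: list[str]) -> str:
--     label = ""
--     for audience in audiences:
--         label = _join(label, _LABELS.get(str(audience or "").strip().lower(), ""))
--     return label
-- ===== Notes on version B (the rewrite author's own statement) =====
-- stated objective: alternative
-- what changed: Replaces A's normalized-set construction followed by subset/membership branching with a map-reduce: each audience is mapped to its label through a lookup table and the labels are folded with an associative join on the four-element label lattice (bottom '', top 'All School'), so the accumulator is the answer itself and the final branch chain disappears.
import Mathlib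
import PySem

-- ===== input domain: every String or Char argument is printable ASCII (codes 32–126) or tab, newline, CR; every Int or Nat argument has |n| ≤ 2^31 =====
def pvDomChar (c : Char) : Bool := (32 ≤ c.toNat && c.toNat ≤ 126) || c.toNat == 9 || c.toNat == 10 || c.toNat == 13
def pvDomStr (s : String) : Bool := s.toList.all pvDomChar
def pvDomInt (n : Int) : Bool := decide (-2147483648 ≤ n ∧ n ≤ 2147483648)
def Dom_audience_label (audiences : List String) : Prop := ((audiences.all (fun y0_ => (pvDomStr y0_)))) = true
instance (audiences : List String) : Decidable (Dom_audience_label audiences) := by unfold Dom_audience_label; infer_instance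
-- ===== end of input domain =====

-- B maps each audience to a label via a lookup table and folds the labels with an
-- associative join on the label lattice, replacing A's set + subset/membership branches.


-- ===== PORT A =====
-- the set-comprehension loop body of A
def audStepA (s : PySem.Set String) (audience : String) : PySem.Set String :=
  if PySem.Str.strip audience ≠ "" then
    PySem.Set.add s (PySem.Str.lower (PySem.Str.strip audience))
  else s

def audience_label (audiences : List String) : String :=
  let normalized : PySem.Set String := audiences.foldl audStepA PySem.Set.empty
  if PySem.Set.issubset (PySem.Set.ofList ["middle-school", "upper-school"]) normalized then
    "All School"
  else if PySem.Set.contains normalized "middle-school" then "Middle School"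
  else if PySem.Set.contains normalized "upper-school" then "Upper School"
  else ""

-- ===== PORT B =====
-- B's lookup table _LABELS
def audLabelMap : PySem.Dict String String :=
  PySem.Dict.ofList [("middle-school", "Middle School"), ("upper-school", "Upper School")]

-- B's _join: join in the label lattice ("" bottom, "All School" top)
def audJoin (x y : String) : String :=
  if x = y ∨ y = "" then x
  else if x = "" then y
  else "All School"

def audience_label_alt (audiences : List String) : String :=
  audiences.foldl
    (fun label audience =>
      audJoin label (PySem.Dict.getD audLabelMap (PySem.Str.lower (PySem.Str.strip audience)) ""))
    ""

-- ===== PRECONDITION & SPEC =====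
def Spec_audience_label (audiences : List String) (out : String) : Prop := out = audience_label_alt audiences
instance (audiences : List String) (out : String) : Decidable (Spec_audience_label audiences out) := by unfold Spec_audience_label; infer_instance

-- ===== CLAIM (what is proved, stated in full; the proofs are below) =====
def Claim_equal_audience_label : Prop := ∀ (audiences : List String), Dom_audience_label audiences → Spec_audience_label audiences (audience_label audiences)

-- ===== LEMMAS AND PROOFS =====

-- the label determined by presence of the two tokens (proof-side characterisation)
def audTheLabel (m u : Bool) : String :=
  if m && u then "All School" else if m then "Middle School" else if u then "Upper School" else ""

-- the lookup table, pointwise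
lemma audLookup_eq (c : String) :
    PySem.Dict.getD audLabelMap c "" =
      if c = "middle-school" then "Middle School"
      else if c = "upper-school" then "Upper School" else "" := by
  have hrep : audLabelMap
      = (PySem.Dict.empty.insert "middle-school" "Middle School").insert
          "upper-school" "Upper School" := rfl
  rw [hrep, PySem.Dict.getD_insert, PySem.Dict.getD_insert, PySem.Dict.getD_empty]
  split_ifs <;> simp_all

-- membership in A's fold = membership before ∨ some element normalizes to k (k nonempty)
lemma audMemA (k : String) (hk : k ≠ "") (l : List String) (s : PySem.Set String) :
    (k ∈ l.foldl audStepA s) ↔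
      (k ∈ s ∨ l.any (fun a => PySem.Str.lower (PySem.Str.strip a) == k) = true) := by
  induction l generalizing s with
  | nil => simp
  | cons a t ih =>
    simp only [List.foldl_cons, List.any_cons, Bool.or_eq_true]
    by_cases hst : PySem.Str.strip a = ""
    · have hA : audStepA s a = s := by simp [audStepA, hst]
      have hne : (PySem.Str.lower (PySem.Str.strip a) == k) = false := by
        rw [hst, show PySem.Str.lower "" = "" from by decide, beq_eq_false_iff_ne]
        exact fun h => hk h.symm
      rw [hA, ih, hne]; simp
    · have hA : audStepA s a = PySem.Set.add s (PySem.Str.lower (PySem.Str.strip a)) := by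
        simp [audStepA, hst]
      rw [hA, ih]
      simp only [PySem.Set.mem_add, beq_iff_eq]
      constructor
      · rintro (⟨h | h⟩ | h)
        · exact Or.inl h
        · exact Or.inr (Or.inl h.symm)
        · exact Or.inr (Or.inr h)
      · rintro (h | h | h)
        · exact Or.inl (Or.inl h)
        · exact Or.inl (Or.inr h.symm)
        · exact Or.inr h

-- B's fold, characterised through audTheLabel
lemma audAltChar (l : List String) (m u : Bool) :
    l.foldl
      (fun label audience =>
        audJoin label (PySem.Dict.getD audLabelMap (PySem.Str.lower (PySem.Str.strip audience)) ""))
      (audTheLabel m u)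
    = audTheLabel (m || l.any (fun a => PySem.Str.lower (PySem.Str.strip a) == "middle-school"))
                  (u || l.any (fun a => PySem.Str.lower (PySem.Str.strip a) == "upper-school")) := by
  induction l generalizing m u with
  | nil => simp
  | cons a t ih =>
    simp only [List.foldl_cons, List.any_cons]
    rw [audLookup_eq]
    by_cases h1 : PySem.Str.lower (PySem.Str.strip a) = "middle-school"
    · have hstep : audJoin (audTheLabel m u) "Middle School" = audTheLabel true u := by
        cases m <;> cases u <;> decide
      have h2 : PySem.Str.lower (PySem.Str.strip a) ≠ "upper-school" := by rw [h1]; decide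
      have b1 : (PySem.Str.lower (PySem.Str.strip a) == "middle-school") = true := by simp [h1]
      have b2 : (PySem.Str.lower (PySem.Str.strip a) == "upper-school") = false := by simp [h2]
      rw [if_pos h1, hstep, ih, b1, b2]
      simp
    · by_cases h2 : PySem.Str.lower (PySem.Str.strip a) = "upper-school"
      · have hstep : audJoin (audTheLabel m u) "Upper School" = audTheLabel m true := by
          cases m <;> cases u <;> decide
        have b1 : (PySem.Str.lower (PySem.Str.strip a) == "middle-school") = false := by simp [h1]
        have b2 : (PySem.Str.lower (PySem.Str.strip a) == "upper-school") = true := by simp [h2]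
        rw [if_neg h1, if_pos h2, hstep, ih, b1, b2]
        simp
      · have hstep : audJoin (audTheLabel m u) "" = audTheLabel m u := by
          cases m <;> cases u <;> decide
        have b1 : (PySem.Str.lower (PySem.Str.strip a) == "middle-school") = false := by simp [h1]
        have b2 : (PySem.Str.lower (PySem.Str.strip a) == "upper-school") = false := by simp [h2]
        rw [if_neg h1, if_neg h2, hstep, ih, b1, b2]
        simp

-- ===== VERDICT (by name: the statement is the Claim_ definition above) =====
theorem audience_label_spec : Claim_equal_audience_label := by
  intro audiences _
  unfold Spec_audience_label audience_label audience_label_alt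
  have hM := audMemA "middle-school" (by decide) audiences PySem.Set.empty
  have hU := audMemA "upper-school" (by decide) audiences PySem.Set.empty
  rw [show (PySem.Set.empty : PySem.Set String) = [] from rfl] at hM hU
  simp only [List.not_mem_nil, false_or] at hM hU
  have hB := audAltChar audiences false false
  simp only [Bool.false_or] at hB
  rw [show (audTheLabel false false) = "" from rfl] at hB
  rw [hB]
  set m := audiences.any (fun a => PySem.Str.lower (PySem.Str.strip a) == "middle-school") with hm
  set u := audiences.any (fun a => PySem.Str.lower (PySem.Str.strip a) == "upper-school") with hu
  have hsub : PySem.Set.issubset (PySem.Set.ofList ["middle-school", "upper-school"])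
      (audiences.foldl audStepA PySem.Set.empty) = (m && u) := by
    apply Bool.eq_iff_iff.mpr
    rw [PySem.Set.issubset_iff]
    constructor
    · intro hall
      have h1 := hM.mp (hall _ (by rw [PySem.Set.mem_ofList]; simp))
      have h2 := hU.mp (hall _ (by rw [PySem.Set.mem_ofList]; simp))
      simp [h1, h2]
    · intro hpp x hx
      rw [PySem.Set.mem_ofList] at hx
      simp only [Bool.and_eq_true] at hpp
      simp only [List.mem_cons, List.not_mem_nil, or_false] at hx
      rcases hx with rfl | rfl
      · exact hM.mpr hpp.1
      · exact hU.mpr hpp.2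
  have hcm : PySem.Set.contains (audiences.foldl audStepA PySem.Set.empty) "middle-school" = m := by
    apply Bool.eq_iff_iff.mpr; rw [PySem.Set.contains_iff]; exact hM
  have hcu : PySem.Set.contains (audiences.foldl audStepA PySem.Set.empty) "upper-school" = u := by
    apply Bool.eq_iff_iff.mpr; rw [PySem.Set.contains_iff]; exact hU
  simp only [hsub, hcm, hcu]
  cases m <;> cases u <;> simp [audTheLabel]
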